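-- pv_equiv track=rewrite | github.com/dingjingmaster/novel_desktop_html | tools/book/bin/files/common.py | get_book_name
-- ===== SOURCE A (Python) =====
-- def get_book_name(path:str)->str:
-- 	arrs = []
-- 	arr = path.split('/')
-- 	for i in arr:
-- 		tp = i.split('\\')
-- 		if len(tp) == 1:
-- 			arrs.append(tp[0])
-- 		elif len(tp) > 1:
-- 			for j in tp:
-- 				arrs.append(j)
-- 	return arrs[-1].split('.')[0].strip()
-- ===== SOURCE B (Python) =====
-- def get_book_name(path: str) -> str:
--     idx = max(path.rfind('/'), path.rfind('\\'))
--     name = path[idx + 1:]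
--     return name.split('.')[0].strip()
-- ===== Notes on version B (the rewrite author's own statement) =====
-- stated objective: simpler
-- what changed: Instead of splitting the path on one separator and re-splitting every piece on the other into a flat list of segments, B locates the last separator of either kind via rfind, slices the suffix after it, and applies the same first-dot cut and strip; no intermediate lists are built.
import Mathlib
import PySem

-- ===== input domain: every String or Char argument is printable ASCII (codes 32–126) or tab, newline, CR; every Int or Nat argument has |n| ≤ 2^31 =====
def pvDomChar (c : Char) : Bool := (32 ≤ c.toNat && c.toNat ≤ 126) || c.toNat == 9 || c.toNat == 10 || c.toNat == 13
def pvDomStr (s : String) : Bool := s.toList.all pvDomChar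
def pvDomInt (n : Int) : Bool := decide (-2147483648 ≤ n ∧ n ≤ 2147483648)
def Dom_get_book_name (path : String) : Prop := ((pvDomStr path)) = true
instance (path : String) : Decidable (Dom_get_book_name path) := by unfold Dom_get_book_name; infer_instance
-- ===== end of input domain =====

-- B replaces A's split-on-'/'-then-resplit-on-'\' flattening by a single rfind of the
-- last separator of either kind followed by a slice (objective: simpler).

-- ===== PORT A =====
def get_book_name (path : String) : String :=
  let arr := (PySem.Str.split? path "/").getD []
  let arrs := arr.foldl (fun arrs i =>
    let tp := (PySem.Str.split? i "\\").getD []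
    if tp.length == 1 then
      arrs ++ [(PySem.List.pyGet? tp 0).getD ""]
    else if tp.length > 1 then
      tp.foldl (fun a j => a ++ [j]) arrs
    else arrs) ([] : List String)
  PySem.Str.strip ((PySem.List.pyGet?
    ((PySem.Str.split? ((PySem.List.pyGet? arrs (-1)).getD "") ".").getD []) 0).getD "")

-- ===== PORT B =====
def get_book_name_alt (path : String) : String :=
  let idx := max (PySem.Str.rfind path "/") (PySem.Str.rfind path "\\")
  let name := PySem.Str.slice path (some (idx + 1)) none
  PySem.Str.strip ((PySem.List.pyGet? ((PySem.Str.split? name ".").getD []) 0).getD "")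

-- ===== PRECONDITION & SPEC =====
def Spec_get_book_name (path : String) (out : String) : Prop := out = get_book_name_alt path
instance (path : String) (out : String) : Decidable (Spec_get_book_name path out) := by unfold Spec_get_book_name; infer_instance

-- ===== CLAIM (what is proved, stated in full; the proofs are below) =====
def Claim_equal_get_book_name : Prop := ∀ (path : String), Dom_get_book_name path → Spec_get_book_name path (get_book_name path)

-- ===== LEMMAS AND PROOFS =====
theorem pv_tw_getElem {α : Type} (p : α → Bool) (l : List α) (i : Nat)
    (h : i < (l.takeWhile p).length) (h' : i < l.length) : p (l[i]'h') = true := by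
  induction l generalizing i with
  | nil => simp at h'
  | cons a l ih =>
    by_cases hp : p a = true
    · cases i with
      | zero => simpa using hp
      | succ j =>
        simp [List.takeWhile, hp] at h
        exact ih j (by omega) (by simpa using h')
    · simp [List.takeWhile, (by simpa using hp : p a = false)] at h

theorem pv_tw_getElem_fail {α : Type} (p : α → Bool) (l : List α)
    (h : (l.takeWhile p).length < l.length) : p (l[(l.takeWhile p).length]'h) = false := by
  induction l with
  | nil => simp at h
  | cons a l ih =>
    by_cases hp : p a = true
    · simp only [List.takeWhile, hp] at h ⊢
      simpa using ih (by simpa using h)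
    · have hp' : p a = false := (by simpa using hp : p a = false)
      simp [List.takeWhile, hp']

theorem pv_tw_len_le {α : Type} (p : α → Bool) (l : List α) :
    (l.takeWhile p).length ≤ l.length := (List.takeWhile_prefix p).length_le

theorem pv_tw_append_fail {α : Type} (p : α → Bool) (u v : List α) (c : α)
    (hc : p c = false) : (u ++ c :: v).takeWhile p = u.takeWhile p := by
  rw [List.takeWhile_append]
  split_ifs with h
  · have h2 : u.takeWhile p = u := by
      rw [List.prefix_iff_eq_take.mp (List.takeWhile_prefix p), h, List.take_length]
    simp [List.takeWhile, hc, h2]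
  · rfl

theorem pv_tw_tw_len {α : Type} (p q : α → Bool) (l : List α) :
    ((l.takeWhile p).takeWhile q).length = min (l.takeWhile p).length (l.takeWhile q).length := by
  induction l with
  | nil => simp
  | cons a l ih =>
    by_cases hp : p a = true
    · by_cases hq : q a = true
      · simp [List.takeWhile, hp, hq, ih]
      · have hq' : q a = false := by simpa using hq
        simp [List.takeWhile, hp, hq']
    · have hp' : p a = false := by simpa using hp
      simp [List.takeWhile, hp']

theorem pv_foldl_append {α : Type} (l : List α) (a0 : List α) :
    l.foldl (fun a j => a ++ [j]) a0 = a0 ++ l := by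
  induction l generalizing a0 with
  | nil => simp
  | cons x l ih => simp [List.foldl, ih]

theorem pv_prefix_single (c : Char) (m : List Char) :
    [c].isPrefixOf m = true ↔ m.head? = some c := by
  cases m with
  | nil => simp [List.isPrefixOf]
  | cons a m =>
    have h1 : [c].isPrefixOf (a::m) = (c == a) := by simp [List.isPrefixOf]
    rw [h1]
    simp only [beq_iff_eq, List.head?_cons, Option.some.injEq]
    exact eq_comm

theorem pv_splitOn_go_getLast (c : Char) (fuel : Nat) :
    ∀ (l cur : List Char) (acc : List (List Char)), l.length < fuel →
    (∀ x ∈ cur, (x == c) = false) →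
    (PySem.Chars.splitOn.go [c] fuel l cur acc).getLast? =
      some (((cur.reverse ++ l).reverse.takeWhile (fun x => !(x == c))).reverse) := by
  induction fuel with
  | zero => intro l cur acc h _; omega
  | succ f ih =>
    intro l cur acc h hcur
    cases l with
    | nil =>
      rw [show PySem.Chars.splitOn.go [c] (f+1) [] cur acc = (cur.reverse :: acc).reverse from by
        simp [PySem.Chars.splitOn.go]]
      rw [List.reverse_cons, List.getLast?_concat]
      have h2 : (cur.reverse ++ ([] : List Char)).reverse.takeWhile (fun x => !(x == c)) = cur := by
        rw [List.append_nil, List.reverse_reverse]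
        exact List.takeWhile_eq_self_iff.mpr (fun x hx => by simp [hcur x hx])
      rw [h2]
    | cons ch rest =>
      rw [show PySem.Chars.splitOn.go [c] (f+1) (ch::rest) cur acc =
          if [c].isPrefixOf (ch::rest) then PySem.Chars.splitOn.go [c] f rest [] (cur.reverse :: acc)
          else PySem.Chars.splitOn.go [c] f rest (ch::cur) acc from by
        rw [PySem.Chars.splitOn.go]; split <;> rfl]
      by_cases hpc : [c].isPrefixOf (ch::rest) = true
      · have hch : ch = c := by
          have h6 := (pv_prefix_single c (ch::rest)).mp hpc
          simp only [List.head?_cons, Option.some.injEq] at h6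
          exact h6
        subst hch
        rw [if_pos hpc, ih rest [] _ (by simp at h ⊢; omega) (by simp)]
        have h3 : (cur.reverse ++ ch :: rest).reverse = rest.reverse ++ ch :: cur := by simp
        rw [h3, pv_tw_append_fail _ _ _ _ (by simp)]
        simp
      · rw [if_neg hpc]
        have hchc : (ch == c) = false := by
          rcases Bool.eq_false_or_eq_true (ch == c) with h1 | h1
          · exact absurd ((pv_prefix_single c (ch::rest)).mpr
              (by simp [beq_iff_eq.mp h1])) hpc
          · exact h1
        rw [ih rest (ch::cur) acc (by simp at h ⊢; omega)
          (by intro x hx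
              rcases List.mem_cons.mp hx with h1 | h1
              · subst h1; exact hchc
              · exact hcur x h1)]
        have h4 : (ch::cur).reverse ++ rest = cur.reverse ++ ch :: rest := by simp
        rw [h4]

theorem pv_splitOn_getLast (c : Char) (s : List Char) :
    (PySem.Chars.splitOn s [c]).getLast? = some ((s.reverse.takeWhile (fun x => !(x == c))).reverse) := by
  have := pv_splitOn_go_getLast c (s.length + 1) s [] [] (by omega) (by simp)
  simpa [PySem.Chars.splitOn] using this

theorem pv_splitOn_ne_nil (c : Char) (s : List Char) : PySem.Chars.splitOn s [c] ≠ [] := by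
  intro h
  have h2 := pv_splitOn_getLast c s
  rw [h] at h2
  simp at h2

theorem pv_rfind_single (s : List Char) (c : Char) :
    PySem.Chars.rfind s [c] =
      ((s.length - (s.reverse.takeWhile (fun x => !(x == c))).length : Nat) : Int) - 1 := by
  set p : Char → Bool := fun x => !(x == c) with hp
  set t := (s.reverse.takeWhile p).length with ht
  have htle : t ≤ s.length := by
    have := pv_tw_len_le p s.reverse
    simpa using this
  set K := s.length - t with hK
  have hT1 : ∀ i, K ≤ i → i < s.length → s[i]? ≠ some c := by
    intro i hKi hi hcon
    have hj : s.length - 1 - i < t := by omega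
    have hj2 : s.length - 1 - i < s.reverse.length := by simp only [List.length_reverse]; omega
    have h1 := pv_tw_getElem p s.reverse (s.length - 1 - i) hj hj2
    rw [List.getElem_reverse] at h1
    have h2 : s[s.length - 1 - (s.length - 1 - i)]? = some c := by
      rw [show s.length - 1 - (s.length - 1 - i) = i from by omega]
      exact hcon
    rw [List.getElem?_eq_getElem (by omega)] at h2
    rw [Option.some.injEq] at h2
    rw [h2] at h1
    simp [hp] at h1
  have hT2 : 0 < K → s[K-1]? = some c := by
    intro hKpos
    have hlt : (s.reverse.takeWhile p).length < s.reverse.length := by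
      simp only [List.length_reverse]; omega
    have h1 := pv_tw_getElem_fail p s.reverse hlt
    rw [List.getElem_reverse] at h1
    have hi : s.length - 1 - t < s.length := by omega
    have heq : s[s.length - 1 - t]'hi = c := by
      have h4 : (s[s.length - 1 - t]'hi == c) = true := by simpa [hp] using h1
      exact beq_iff_eq.mp h4
    rw [show K - 1 = s.length - 1 - t from by omega]
    rw [List.getElem?_eq_getElem hi]
    exact congrArg some heq
  have hpfx : ∀ j : Nat, [c].isPrefixOf (List.drop j s) = true ↔ s[j]? = some c := by
    intro j
    rw [pv_prefix_single, List.head?_drop]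
  have go_eq : ∀ j : Nat, K ≤ j + 1 → PySem.Chars.rfind.go s [c] j = (K : Int) - 1 := by
    intro j
    induction j with
    | zero =>
      intro hK1
      rw [show PySem.Chars.rfind.go s [c] 0 = if [c].isPrefixOf s then 0 else -1 from by
        rw [PySem.Chars.rfind.go]]
      by_cases h0 : [c].isPrefixOf s = true
      · rw [if_pos h0]
        have hs0 : s[0]? = some c := by
          have := (hpfx 0).mp (by simpa using h0)
          simpa using this
        have hlen : 0 < s.length := by
          cases s with
          | nil => simp at hs0
          | cons a l => simp
        have hK0 : K ≠ 0 := fun hk0 => hT1 0 (by omega) hlen hs0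
        omega
      · rw [if_neg h0]
        have hK0 : K = 0 := by
          by_contra hk
          have hs0 : s[0]? = some c := by
            rw [show (0:Nat) = K - 1 from by omega]
            exact hT2 (by omega)
          have h6 := (hpfx 0).mpr (by simpa using hs0)
          rw [List.drop_zero] at h6
          exact h0 h6
        rw [hK0]
        simp
    | succ j ihj =>
      intro hK1
      rw [show PySem.Chars.rfind.go s [c] (j+1) =
          if [c].isPrefixOf (List.drop (j+1) s) then ((j:Int)+1) else PySem.Chars.rfind.go s [c] j from by
        rw [PySem.Chars.rfind.go]; split <;> simp]
      by_cases hp1 : [c].isPrefixOf (List.drop (j+1) s) = true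
      · rw [if_pos hp1]
        have hs : s[j+1]? = some c := (hpfx (j+1)).mp hp1
        have hlt : j + 1 < s.length := by
          by_contra hge
          rw [List.getElem?_eq_none (by omega)] at hs
          simp at hs
        have hKj : K = j + 2 := by
          by_contra hne
          exact hT1 (j+1) (by omega) hlt hs
        rw [hKj]
        push_cast
        ring
      · rw [if_neg hp1]
        apply ihj
        by_contra hgt
        have hs : s[j+1]? = some c := by
          rw [show j + 1 = K - 1 from by omega]
          exact hT2 (by omega)
        exact hp1 ((hpfx (j+1)).mpr hs)
  rw [show PySem.Chars.rfind s [c] = PySem.Chars.rfind.go s [c] s.length from rfl]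
  exact go_eq s.length (by omega)

theorem pv_flatMap_getLast {α β : Type} (f : α → List β) (ps : List α) (q : α)
    (hne : ∀ p ∈ ps, f p ≠ []) (hq : ps.getLast? = some q) :
    (ps.flatMap f).getLast? = (f q).getLast? := by
  induction ps with
  | nil => simp at hq
  | cons x ps ih =>
    cases ps with
    | nil =>
      simp only [List.getLast?_singleton, Option.some.injEq] at hq
      subst hq
      simp
    | cons y tl =>
      rw [List.flatMap_cons, List.getLast?_append]
      rw [List.getLast?_cons_cons] at hq
      rw [ih (fun p hp => hne p (List.mem_cons_of_mem _ hp)) hq]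
      have hmem : q ∈ y :: tl := List.mem_of_getLast? hq
      have hq_ne : f q ≠ [] := hne q (List.mem_cons_of_mem _ hmem)
      cases hfq : (f q).getLast? with
      | none =>
        rw [List.getLast?_eq_none_iff] at hfq
        exact absurd hfq hq_ne
      | some b => simp

theorem pv_split_getD (s : String) (c : Char) (cs : String) (h : cs.toList = [c]) :
    (PySem.Str.split? s cs).getD [] = (PySem.Chars.splitOn s.toList [c]).map String.ofList := by
  simp [PySem.Str.split?, PySem.Chars.split?, h]

theorem pv_foldA (arr : List String) (acc : List String) :
    arr.foldl (fun arrs i =>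
      let tp := (PySem.Str.split? i "\\").getD []
      if tp.length == 1 then
        arrs ++ [(PySem.List.pyGet? tp 0).getD ""]
      else if tp.length > 1 then
        tp.foldl (fun a j => a ++ [j]) arrs
      else arrs) acc
    = acc ++ arr.flatMap (fun i => (PySem.Chars.splitOn i.toList ['\\']).map String.ofList) := by
  induction arr generalizing acc with
  | nil => simp
  | cons i arr ih =>
    rw [List.foldl_cons, ih]
    have htp : (PySem.Str.split? i "\\").getD [] = (PySem.Chars.splitOn i.toList ['\\']).map String.ofList :=
      pv_split_getD i '\\' "\\" (by decide)
    have hne : (PySem.Str.split? i "\\").getD [] ≠ ([] : List String) := by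
      rw [htp]
      simp [pv_splitOn_ne_nil]
    have hstep : (let tp := (PySem.Str.split? i "\\").getD []
      if tp.length == 1 then
        acc ++ [(PySem.List.pyGet? tp 0).getD ""]
      else if tp.length > 1 then
        tp.foldl (fun a j => a ++ [j]) acc
      else acc) = acc ++ (PySem.Str.split? i "\\").getD [] := by
      show (if ((PySem.Str.split? i "\\").getD []).length == 1 then
        acc ++ [(PySem.List.pyGet? ((PySem.Str.split? i "\\").getD []) 0).getD ""]
      else if ((PySem.Str.split? i "\\").getD []).length > 1 then
        ((PySem.Str.split? i "\\").getD []).foldl (fun a j => a ++ [j]) acc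
      else acc) = acc ++ (PySem.Str.split? i "\\").getD []
      set tp := (PySem.Str.split? i "\\").getD [] with htpdef
      by_cases h1 : tp.length = 1
      · obtain ⟨x, hx⟩ := List.length_eq_one_iff.mp h1
        rw [hx] at h1 ⊢
        simp [PySem.List.pyGet?, PySem.List.pyIdx?]
      · have h2 : tp.length > 1 := by
          cases htp2 : tp with
          | nil => rw [htp2] at hne; exact absurd rfl hne
          | cons a l =>
            rw [htp2] at h1
            cases l with
            | nil => simp at h1
            | cons b l2 => simp [List.length_cons]
        have hb : (tp.length == 1) = false := by simp [h1]
        rw [hb]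
        simp only [Bool.false_eq_true, if_false, h2, if_true]
        exact pv_foldl_append tp acc
    rw [hstep]
    rw [htp, List.flatMap_cons, List.append_assoc]

theorem pv_spec (path : String) : get_book_name path = get_book_name_alt path := by
  unfold get_book_name get_book_name_alt
  dsimp only
  rw [pv_split_getD path '/' "/" (by decide), pv_foldA, List.nil_append,
    PySem.List.pyGet?_neg_one]
  rw [pv_flatMap_getLast (fun i => (PySem.Chars.splitOn i.toList ['\\']).map String.ofList)
    ((PySem.Chars.splitOn path.toList ['/']).map String.ofList)
    (String.ofList ((path.toList.reverse.takeWhile (fun x => !(x == '/'))).reverse))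
    (by intro p hp; simp [pv_splitOn_ne_nil])
    (by rw [List.getLast?_map, pv_splitOn_getLast]; rfl)]
  rw [List.getLast?_map, String.toList_ofList, pv_splitOn_getLast, List.reverse_reverse]
  -- A-side inner string is now: some (ofList ((takeWhile p₁ s.reverse).takeWhile p₂).reverse) |>.getD ""
  -- B-side: compute name
  have hrf1 : PySem.Str.rfind path "/" =
      ((path.toList.length - (path.toList.reverse.takeWhile (fun x => !(x == '/'))).length : Nat) : Int) - 1 := by
    have h := pv_rfind_single path.toList '/'
    rw [show PySem.Str.rfind path "/" = PySem.Chars.rfind path.toList ['/'] from by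
      rw [PySem.Str.rfind]; congr 1]
    exact h
  have hrf2 : PySem.Str.rfind path "\\" =
      ((path.toList.length - (path.toList.reverse.takeWhile (fun x => !(x == '\\'))).length : Nat) : Int) - 1 := by
    have h := pv_rfind_single path.toList '\\'
    rw [show PySem.Str.rfind path "\\" = PySem.Chars.rfind path.toList ['\\'] from by
      rw [PySem.Str.rfind]; congr 1]
    exact h
  rw [hrf1, hrf2]
  set s := path.toList with hs
  set t1 := (s.reverse.takeWhile (fun x => !(x == '/'))).length with ht1
  set t2 := (s.reverse.takeWhile (fun x => !(x == '\\'))).length with ht2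
  have ht1le : t1 ≤ s.length := by
    have := pv_tw_len_le (fun x => !(x == '/')) s.reverse
    simpa using this
  have ht2le : t2 ≤ s.length := by
    have := pv_tw_len_le (fun x => !(x == '\\')) s.reverse
    simpa using this
  have hmax : max (((s.length - t1 : Nat) : Int) - 1) (((s.length - t2 : Nat) : Int) - 1) + 1
      = ((s.length - min t1 t2 : Nat) : Int) := by
    omega
  rw [hmax]
  have hslice : PySem.Str.slice path (some ((s.length - min t1 t2 : Nat) : Int)) none
      = String.ofList ((s.reverse.takeWhile (fun x => !(x == '/'))).takeWhile (fun x => !(x == '\\'))).reverse := by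
    rw [PySem.Str.slice, PySem.Chars.slice_eq_listSlice, ← hs,
      PySem.List.slice_from s (by positivity), Int.toNat_natCast]
    congr 1
    have hm : ((s.reverse.takeWhile (fun x => !(x == '/'))).takeWhile (fun x => !(x == '\\'))).length
        = min t1 t2 := by
      rw [pv_tw_tw_len, ← ht1, ← ht2]
    have hpre : (s.reverse.takeWhile (fun x => !(x == '/'))).takeWhile (fun x => !(x == '\\'))
        = s.reverse.take (min t1 t2) := by
      rw [← hm]
      exact List.prefix_iff_eq_take.mp ((List.takeWhile_prefix _).trans (List.takeWhile_prefix _))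
    rw [hpre, List.take_reverse, List.reverse_reverse]
  rw [hslice]
  rfl

-- ===== VERDICT (by name: the statement is the Claim_ definition above) =====
theorem get_book_name_spec : Claim_equal_get_book_name := by
  intro path _
  unfold Spec_get_book_name
  exact pv_spec path
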